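-- pv_equiv track=rewrite | github.com/aaron031291/grace-3.1- | backend/scraping/url_validator.py | is_google_drive_url
-- ===== SOURCE A (Python) =====
-- def is_google_drive_url(url: str) -> bool:
--     """
--     Check if URL is a Google Drive document link.
--
--     Args:
--         url: The URL to check
--
--     Returns:
--         True if Google Drive document URL, False otherwise
--     """
--     drive_patterns = [
--         'drive.google.com/file',
--         'drive.google.com/uc',
--         'docs.google.com/document',
--         'docs.google.com/spreadsheets',
--         'docs.google.com/presentation'
--     ]
--     url_lower = url.lower()
--     return any(pattern in url_lower for pattern in drive_patterns)
-- ===== SOURCE B (Python) =====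
-- _DRIVE_PATTERNS = (
--     'drive.google.com/file',
--     'drive.google.com/uc',
--     'docs.google.com/document',
--     'docs.google.com/spreadsheets',
--     'docs.google.com/presentation',
-- )
--
--
-- def is_google_drive_url(url: str) -> bool:
--     # One sweep over the lowered URL's start positions, testing each tail
--     # against all patterns at once, instead of five separate substring scans.
--     u = url.lower()
--     for i in range(len(u) + 1):
--         tail = u[i:]
--         if any(tail.startswith(p) for p in _DRIVE_PATTERNS):
--             return True
--     return False
-- ===== Notes on version B (the rewrite author's own statement) =====
-- stated objective: alternative
-- what changed: Replaces five sequential substring-containment scans of the lowered URL with a single sweep over its start positions that tests all five patterns as prefixes of each tail (the naive one-pass multi-pattern matcher); same results, trades C-level substring search for an explicit position loop.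
import Mathlib
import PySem

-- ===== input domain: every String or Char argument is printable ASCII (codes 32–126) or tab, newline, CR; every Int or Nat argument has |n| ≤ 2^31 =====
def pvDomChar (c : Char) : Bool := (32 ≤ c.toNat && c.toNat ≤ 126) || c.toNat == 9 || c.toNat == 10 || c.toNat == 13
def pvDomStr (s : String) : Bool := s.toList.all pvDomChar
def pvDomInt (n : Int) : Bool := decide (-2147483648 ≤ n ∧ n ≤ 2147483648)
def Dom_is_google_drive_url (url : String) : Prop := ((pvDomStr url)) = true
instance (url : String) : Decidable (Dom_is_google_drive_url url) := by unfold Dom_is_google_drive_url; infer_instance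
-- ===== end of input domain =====

-- B replaces five sequential substring scans with one sweep over start positions
-- testing all five patterns as prefixes of each tail; same results, similar cost.

-- ===== PORT A =====
def is_google_drive_url (url : String) : Bool :=
  let drive_patterns : List String :=
    ["drive.google.com/file",
     "drive.google.com/uc",
     "docs.google.com/document",
     "docs.google.com/spreadsheets",
     "docs.google.com/presentation"]
  let url_lower := PySem.Str.lower url
  drive_patterns.any (fun pattern => PySem.Str.isIn pattern url_lower)

-- ===== PORT B =====
def pvDrivePats : List (List Char) :=
  ["drive.google.com/file".toList,
   "drive.google.com/uc".toList,
   "docs.google.com/document".toList,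
   "docs.google.com/spreadsheets".toList,
   "docs.google.com/presentation".toList]

-- the loop over start positions i, testing u[i:] against every pattern
def pvDriveScan : List Char → Bool
  | [] => pvDrivePats.any (fun p => PySem.Chars.startswith [] p)
  | c :: t =>
      pvDrivePats.any (fun p => PySem.Chars.startswith (c :: t) p) || pvDriveScan t

def is_google_drive_url_alt (url : String) : Bool :=
  pvDriveScan (PySem.Str.lower url).toList
-- ===== PRECONDITION & SPEC =====
def Spec_is_google_drive_url (url : String) (out : Bool) : Prop := out = is_google_drive_url_alt url
instance (url : String) (out : Bool) : Decidable (Spec_is_google_drive_url url out) := by unfold Spec_is_google_drive_url; infer_instance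

-- ===== CLAIM (what is proved, stated in full; the proofs are below) =====
def Claim_equal_is_google_drive_url : Prop := ∀ (url : String), Dom_is_google_drive_url url → Spec_is_google_drive_url url (is_google_drive_url url)

-- ===== LEMMAS AND PROOFS =====

theorem pvDriveScan_iff (u : List Char) :
    pvDriveScan u = true ↔ ∃ p ∈ pvDrivePats, p <:+: u := by
  induction u with
  | nil =>
      constructor
      · intro h; exact absurd h (by decide)
      · rintro ⟨p, hp, h⟩
        rw [List.infix_nil] at h
        subst h
        revert hp; decide
  | cons c t ih =>
      simp only [pvDriveScan, Bool.or_eq_true, List.any_eq_true,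
        PySem.Chars.startswith_iff, ih, List.infix_cons_iff]
      constructor
      · rintro (⟨p, hp, h⟩ | ⟨p, hp, h⟩)
        · exact ⟨p, hp, Or.inl h⟩
        · exact ⟨p, hp, Or.inr h⟩
      · rintro ⟨p, hp, h | h⟩
        · exact Or.inl ⟨p, hp, h⟩
        · exact Or.inr ⟨p, hp, h⟩

-- ===== VERDICT (by name: the statement is the Claim_ definition above) =====
set_option maxHeartbeats 2000000 in
theorem is_google_drive_url_spec : Claim_equal_is_google_drive_url := by
  intro url _
  unfold Spec_is_google_drive_url
  rw [Bool.eq_iff_iff]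
  simp only [is_google_drive_url, is_google_drive_url_alt, List.any_eq_true,
    PySem.Str.isIn_iff_infix, pvDriveScan_iff, pvDrivePats, List.mem_cons,
    List.not_mem_nil]
  constructor
  · rintro ⟨p, hp, h⟩
    rcases hp with h1|h1|h1|h1|h1|h1
    · exact ⟨p.toList, Or.inl (by rw [h1]), h⟩
    · exact ⟨p.toList, Or.inr (Or.inl (by rw [h1])), h⟩
    · exact ⟨p.toList, Or.inr (Or.inr (Or.inl (by rw [h1]))), h⟩
    · exact ⟨p.toList, Or.inr (Or.inr (Or.inr (Or.inl (by rw [h1])))), h⟩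
    · exact ⟨p.toList, Or.inr (Or.inr (Or.inr (Or.inr (Or.inl (by rw [h1]))))), h⟩
    · exact h1.elim
  · rintro ⟨p, hp, h⟩
    rcases hp with h1|h1|h1|h1|h1|h1
    · exact ⟨"drive.google.com/file", Or.inl rfl, h1 ▸ h⟩
    · exact ⟨"drive.google.com/uc", Or.inr (Or.inl rfl), h1 ▸ h⟩
    · exact ⟨"docs.google.com/document", Or.inr (Or.inr (Or.inl rfl)), h1 ▸ h⟩
    · exact ⟨"docs.google.com/spreadsheets", Or.inr (Or.inr (Or.inr (Or.inl rfl))), h1 ▸ h⟩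
    · exact ⟨"docs.google.com/presentation", Or.inr (Or.inr (Or.inr (Or.inr (Or.inl rfl)))), h1 ▸ h⟩
    · exact h1.elim
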